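-- pv_equiv track=rewrite | github.com/jdelpino-dev/thinkpython | bibth3_strings.py | rot_encoder
-- ===== SOURCE A (Python) =====
-- def rot_encoder(string, rotation, chr_bloks):
--     encoded_string = ""
--     for character in string:
--         encoded_chr = character
--         for chr_blok in chr_bloks:
--             if character in chr_blok:
--                 # I use modular arithmetic to make the alphabetic rotation
--                 pos = chr_blok.index(character)
--                 mod_n = len(chr_blok)
--                 new_pos = (pos + rotation) % mod_n
--                 encoded_chr = chr_blok[new_pos]
--                 break
--         encoded_string += encoded_chr
--     return encoded_string
-- ===== SOURCE B (Python) =====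
-- def rot_encoder(string, rotation, chr_bloks):
--     # Build one translation table (first block / first occurrence wins),
--     # then translate the whole string in a single pass.
--     table = {}
--     for blok in chr_bloks:
--         n = len(blok)
--         for pos, ch in enumerate(blok):
--             if ord(ch) not in table:
--                 table[ord(ch)] = ord(blok[(pos + rotation) % n])
--     return string.translate(table)
-- ===== Notes on version B (the rewrite author's own statement) =====
-- stated objective: idiomatic
-- what changed: Instead of scanning every block for every character, B builds a translation table once (iterating the blocks, first occurrence wins) and then translates the string in a single pass with str.translate.
import Mathlib
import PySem

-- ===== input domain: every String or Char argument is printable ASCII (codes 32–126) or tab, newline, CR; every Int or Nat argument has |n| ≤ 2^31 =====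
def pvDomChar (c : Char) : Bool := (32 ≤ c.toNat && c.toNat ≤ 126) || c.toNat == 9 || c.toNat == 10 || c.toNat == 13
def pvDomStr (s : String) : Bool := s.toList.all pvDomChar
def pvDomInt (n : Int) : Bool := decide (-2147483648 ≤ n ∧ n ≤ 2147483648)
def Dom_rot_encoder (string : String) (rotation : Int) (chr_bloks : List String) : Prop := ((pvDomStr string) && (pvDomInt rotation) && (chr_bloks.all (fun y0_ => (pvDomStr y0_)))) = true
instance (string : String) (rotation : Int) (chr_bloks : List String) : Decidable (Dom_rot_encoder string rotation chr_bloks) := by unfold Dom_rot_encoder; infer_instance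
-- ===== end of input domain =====

-- B builds the whole translation table first (first block / first occurrence wins) and then
-- maps the string through it once, instead of rescanning all blocks for every character.

-- ===== PORT A =====
-- inner 'for chr_blok in chr_bloks: … break' loop of A
def rotCharA (character : Char) (rotation : Int) : List String → Char
  | [] => character
  | chr_blok :: rest =>
    if character ∈ chr_blok.toList then
      let pos : Nat := (PySem.List.index? chr_blok.toList character).getD 0
      let mod_n : Int := (chr_blok.toList.length : Int)
      let new_pos : Int := PySem.Int.mod ((pos : Int) + rotation) mod_n
      (PySem.List.pyGet? chr_blok.toList new_pos).getD character
    else rotCharA character rotation rest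

def rot_encoder (string : String) (rotation : Int) (chr_bloks : List String) : String :=
  String.mk (string.toList.foldl
    (fun encoded_string character => encoded_string ++ [rotCharA character rotation chr_bloks]) [])

-- ===== PORT B =====
-- table[ch] = blok[(pos + rotation) % len(blok)], inserted only if ch is not yet a key
def buildTable (rotation : Int) (chr_bloks : List String) : PySem.Dict Char Char :=
  chr_bloks.foldl (fun table blok =>
    (PySem.List.enumerate blok.toList).foldl (fun table pc =>
      if (table.get? pc.2).isSome then table
      else table.insert pc.2
        ((PySem.List.pyGet? blok.toList
            (PySem.Int.mod (pc.1 + rotation) (blok.toList.length : Int))).getD pc.2))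
      table)
    PySem.Dict.empty

def rot_encoder_alt (string : String) (rotation : Int) (chr_bloks : List String) : String :=
  let table := buildTable rotation chr_bloks
  String.mk (string.toList.map (fun c => table.getD c c))

-- ===== PRECONDITION & SPEC =====
def Spec_rot_encoder (string : String) (rotation : Int) (chr_bloks : List String) (out : String) : Prop := out = rot_encoder_alt string rotation chr_bloks
instance (string : String) (rotation : Int) (chr_bloks : List String) (out : String) : Decidable (Spec_rot_encoder string rotation chr_bloks out) := by unfold Spec_rot_encoder; infer_instance

-- ===== CLAIM (what is proved, stated in full; the proofs are below) =====
def Claim_equal_rot_encoder : Prop := ∀ (string : String) (rotation : Int) (chr_bloks : List String), Dom_rot_encoder string rotation chr_bloks → Spec_rot_encoder string rotation chr_bloks (rot_encoder string rotation chr_bloks)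

-- ===== LEMMAS AND PROOFS =====

-- the per-entry value written by B's inner loop
def tVal (rotation : Int) (blok : List Char) (i : Int) (c : Char) : Char :=
  (PySem.List.pyGet? blok (PySem.Int.mod (i + rotation) (blok.length : Int))).getD c

-- what B's table maps c to, expressed as A's first-matching-block scan
def scan (c : Char) (rotation : Int) : List String → Option Char
  | [] => none
  | b :: r =>
    match b.toList.idxOf? c with
    | some k => some (tVal rotation b.toList (k : Int) c)
    | none => scan c rotation r

-- B's inner fold over one enumerated block: first occurrence wins, earlier entries kept
theorem inner_get? (rotation : Int) (blok : List Char) :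
    ∀ (t : List Char) (s : Int) (d : PySem.Dict Char Char) (c : Char),
    (((PySem.List.enumerate t s).foldl (fun table pc =>
        if (table.get? pc.2).isSome then table
        else table.insert pc.2
          ((PySem.List.pyGet? blok
              (PySem.Int.mod (pc.1 + rotation) (blok.length : Int))).getD pc.2)) d).get? c)
    = (d.get? c).or ((t.idxOf? c).map (fun k => tVal rotation blok (s + (k : Int)) c)) := by
  intro t
  induction t with
  | nil => intro s d c; simp [PySem.List.enumerate_nil]
  | cons a t ih =>
    intro s d c
    rw [PySem.List.enumerate_cons]
    simp only [List.foldl_cons]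
    by_cases hd : (d.get? a).isSome
    · rw [if_pos hd, ih, List.idxOf?_cons]
      by_cases hac : a = c
      · subst hac
        simp [Option.or_of_isSome hd]
      · rcases h : List.idxOf? c t with _ | k
        · simp [hac]
        · have harr2 : s + 1 + (k : Int) = s + ((k : Int) + 1) := by ring
          simp [hac, harr2]
    · rw [if_neg hd, ih, List.idxOf?_cons]
      rw [Option.not_isSome_iff_eq_none] at hd
      by_cases hac : a = c
      · subst hac
        rw [PySem.Dict.get?_insert_self, hd]
        simp [tVal]
      · rw [PySem.Dict.get?_insert_of_ne d _ (fun h => hac h.symm)]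
        rcases h : List.idxOf? c t with _ | k
        · simp [hac]
        · have harr2 : s + 1 + (k : Int) = s + ((k : Int) + 1) := by ring
          simp [hac, harr2]

-- B's outer fold over the blocks, characterised by the first-matching-block scan
theorem outer_get? (rotation : Int) :
    ∀ (bloks : List String) (d : PySem.Dict Char Char) (c : Char),
    ((bloks.foldl (fun table blok =>
        (PySem.List.enumerate blok.toList).foldl (fun table pc =>
          if (table.get? pc.2).isSome then table
          else table.insert pc.2
            ((PySem.List.pyGet? blok.toList
                (PySem.Int.mod (pc.1 + rotation) (blok.toList.length : Int))).getD pc.2))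
          table) d).get? c)
    = (d.get? c).or (scan c rotation bloks) := by
  intro bloks
  induction bloks with
  | nil => intro d c; simp [scan]
  | cons b r ih =>
    intro d c
    simp only [List.foldl_cons]
    rw [ih, inner_get? rotation b.toList b.toList 0 d c]
    rcases h : b.toList.idxOf? c with _ | k
    · simp [scan, h]
    · simp [scan, h]

theorem scan_getD (rotation : Int) (c : Char) :
    ∀ (bloks : List String), (scan c rotation bloks).getD c = rotCharA c rotation bloks := by
  intro bloks
  induction bloks with
  | nil => simp [scan, rotCharA]
  | cons b r ih =>
    by_cases hmem : c ∈ b.toList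
    · rcases Option.isSome_iff_exists.mp (List.isSome_idxOf?.mpr hmem) with ⟨k, hk⟩
      simp [scan, hk, rotCharA, hmem, tVal, PySem.List.index?_eq_idxOf?]
    · have hn : b.toList.idxOf? c = none := List.idxOf?_eq_none_iff.mpr hmem
      simp only [scan, hn]
      simpa [rotCharA, hmem] using ih

theorem table_getD (rotation : Int) (chr_bloks : List String) (c : Char) :
    (buildTable rotation chr_bloks).getD c c = rotCharA c rotation chr_bloks := by
  have h1 : (buildTable rotation chr_bloks).get? c = scan c rotation chr_bloks := by
    unfold buildTable
    rw [outer_get? rotation chr_bloks PySem.Dict.empty c]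
    simp
  rw [PySem.Dict.getD, h1, scan_getD]

-- ===== VERDICT (by name: the statement is the Claim_ definition above) =====
theorem rot_encoder_spec : Claim_equal_rot_encoder := by
  intro string rotation chr_bloks _
  unfold Spec_rot_encoder rot_encoder rot_encoder_alt
  congr 1
  rw [PySem.List.foldl_append_singleton_eq_map]
  exact List.map_congr_left (fun c _ => (table_getD rotation chr_bloks c).symm)
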